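-- pv_equiv track=rewrite | github.com/biolab/orange-notification-feed | .travis/generate-feed.py | translate_installed_requirements
-- ===== SOURCE A (Python) =====
-- OPERATORS = {"<", ">", "<=", ">=", "=="}
--
-- def translate_installed_requirements(installed: [str]):
--     # if an installed requirements has no operator, it's syntactic sugar for either installed
--     # or not installed, denoted by >= 0 and == -1 respectively
--     without_operator = [s for s in installed if not any(op in s for op in OPERATORS)]
--     for req in without_operator:
--         installed.remove(req)
--         if req[0] == "~":
--             installed.append(req[1:] + "==-1")
--         else:
--             installed.append(req + ">=0")
--
--     # as not installed is represented by version -1, if < or <= check, add >= 0 check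
--     less_operator = [s for s in installed if any(op in s for op in ["<", "<="])]
--     for req in less_operator:
--         split = req.split("<")
--         installed.append(split[0] + ">=0")
--
--     return installed
-- ===== SOURCE B (Python) =====
-- OPERATORS = {"<", ">", "<=", ">=", "=="}
--
-- def translate_installed_requirements(installed):
--     # Single pass: partition into requirements that already carry an operator and
--     # translated bare requirements; then append ">=0" guards for "<" requirements.
--     kept, translated = [], []
--     for s in installed:
--         if any(op in s for op in OPERATORS):
--             kept.append(s)
--         else:
--             translated.append(s[1:] + "==-1" if s.startswith("~") else s + ">=0")
--     base = kept + translated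
--     result = base + [s.split("<")[0] + ">=0" for s in base if "<" in s]
--     installed[:] = result   # same in-place mutation as the original
--     return installed
-- ===== Notes on version B (the rewrite author's own statement) =====
-- stated objective: faster
-- what changed: replaces the repeated list.remove/append rewriting (a linear scan per bare requirement) by a single order-preserving partition pass over the input, then one filtered comprehension for the '<' guards
import Mathlib
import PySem

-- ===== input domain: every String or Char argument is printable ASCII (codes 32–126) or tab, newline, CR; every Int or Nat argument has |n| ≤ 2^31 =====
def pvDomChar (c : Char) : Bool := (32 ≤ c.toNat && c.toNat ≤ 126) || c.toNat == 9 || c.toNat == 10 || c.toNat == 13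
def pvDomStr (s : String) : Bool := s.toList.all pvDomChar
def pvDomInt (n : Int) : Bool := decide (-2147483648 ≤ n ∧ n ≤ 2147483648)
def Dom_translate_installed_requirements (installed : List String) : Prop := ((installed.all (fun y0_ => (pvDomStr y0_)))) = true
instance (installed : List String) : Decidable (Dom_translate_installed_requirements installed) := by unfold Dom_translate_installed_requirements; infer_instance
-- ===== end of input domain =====

-- B replaces A's repeated list.remove rewriting by one order-preserving partition pass;
-- A mutates `installed` in place and B performs the same mutation (installed[:] = result),
-- the equivalence proved here is about the return value.


-- ===== PORT A =====
def pvOPERATORS : List String := ["<", ">", "<=", ">=", "=="]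

-- any(op in s for op in OPERATORS) — `any` over the set is order-independent
def pvHasOp (s : String) : Bool := pvOPERATORS.any (fun op => PySem.Str.isIn op s)

-- string concatenation on the PySem (List Char) side, kernel-transparent
def pvCat (a b : String) : String := String.ofList (a.toList ++ b.toList)

-- the value A appends for a bare requirement; req[0] == "~" via pyGet?
-- (none, i.e. Python's IndexError on req = "", falls to the else branch; Pre_ excludes "")
def pvTransA (req : String) : String :=
  if PySem.Str.pyGet? req 0 == some '~' then
    pvCat (PySem.Str.slice req (some 1) none) "==-1"
  else pvCat req ">=0"

-- split = req.split("<"); split[0] + ">=0"  (split never returns an empty list, sep ≠ "")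
def pvAdd0 (req : String) : String :=
  pvCat ((((PySem.Str.split? req "<").getD []).headD "")) ">=0"

def translate_installed_requirements (installed : List String) : List String :=
  let without_operator := installed.filter (fun s => !pvHasOp s)
  -- for req in without_operator: installed.remove(req); installed.append(...)
  -- remove never fails here (req is still present); getD keeps the port total
  let installed1 := without_operator.foldl
    (fun cur req => ((PySem.List.remove? cur req).getD cur) ++ [pvTransA req]) installed
  let less_operator := installed1.filter (fun s => (["<", "<="] : List String).any (fun op => PySem.Str.isIn op s))
  less_operator.foldl (fun cur req => cur ++ [pvAdd0 req]) installed1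

-- ===== PORT B =====
def pvTransB (s : String) : String :=
  if PySem.Str.startswith s "~" then pvCat (PySem.Str.slice s (some 1) none) "==-1"
  else pvCat s ">=0"

def translate_installed_requirements_alt (installed : List String) : List String :=
  -- one pass appending each element to `kept` or (translated) to `translated`
  let kt := installed.foldl
    (fun (p : List String × List String) s =>
      if pvHasOp s then (p.1 ++ [s], p.2) else (p.1, p.2 ++ [pvTransB s]))
    ([], [])
  let base := kt.1 ++ kt.2
  base ++ (base.filter (fun s => PySem.Str.isIn "<" s)).map pvAdd0

-- ===== PRECONDITION & SPEC =====
-- Pre_ excludes lists containing the empty string: there Python A raises IndexError at req[0].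
def Pre_translate_installed_requirements (installed : List String) : Prop := "" ∉ installed
instance (installed : List String) : Decidable (Pre_translate_installed_requirements installed) := by unfold Pre_translate_installed_requirements; infer_instance
def pvWitness_translate_installed_requirements : List String := ["~numpy", "scipy<1.5", "pandas"]

def Spec_translate_installed_requirements (installed : List String) (out : List String) : Prop := out = translate_installed_requirements_alt installed
instance (installed : List String) (out : List String) : Decidable (Spec_translate_installed_requirements installed out) := by unfold Spec_translate_installed_requirements; infer_instance

-- ===== CLAIM (what is proved, stated in full; the proofs are below) =====
def Claim_equal_translate_installed_requirements : Prop := ∀ (installed : List String), Dom_translate_installed_requirements installed → Pre_translate_installed_requirements installed → Spec_translate_installed_requirements installed (translate_installed_requirements installed)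

-- ===== LEMMAS AND PROOFS =====

-- A's test req[0] == "~" agrees with B's req.startswith("~") (also on "", where both are false)
lemma trans_eq (s : String) : pvTransA s = pvTransB s := by
  unfold pvTransA pvTransB
  have hc : (PySem.Str.pyGet? s 0 == some '~') = PySem.Str.startswith s "~" := by
    rcases h : s.toList with _ | ⟨c, cs⟩
    · simp [PySem.Str.pyGet?_eq, PySem.Str.startswith_eq, h, PySem.Chars.startswith,
        PySem.List.pyGet?, PySem.List.pyIdx?]
    · simp [PySem.Str.pyGet?_eq, PySem.Str.startswith_eq, h, PySem.Chars.startswith,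
        PySem.List.pyGet?, PySem.List.pyIdx?, List.isPrefixOf, eq_comm]
  rw [hc]

lemma isIn_cat_right (op a b : String) (h : PySem.Str.isIn op b = true) :
    PySem.Str.isIn op (pvCat a b) = true := by
  rw [PySem.Str.isIn_iff_infix] at h ⊢
  obtain ⟨u, v, huv⟩ := h
  exact ⟨a.toList ++ u, v, by simp [pvCat, ← huv]⟩

-- translated requirements carry "==" or ">=", hence an operator
lemma hasOp_transB (s : String) : pvHasOp (pvTransB s) = true := by
  unfold pvTransB
  split
  · exact List.any_eq_true.mpr ⟨"==", by decide, isIn_cat_right "==" _ "==-1" (by decide)⟩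
  · exact List.any_eq_true.mpr ⟨">=", by decide, isIn_cat_right ">=" _ ">=0" (by decide)⟩

lemma remove_append (pre rest : List String) (x : String) (hx : x ∉ pre) :
    PySem.List.remove? (pre ++ x :: rest) x = some (pre ++ rest) := by
  induction pre with
  | nil => simp
  | cons a pre ih =>
    have ha : a ≠ x := fun h => hx (h ▸ List.mem_cons_self)
    have hx' : x ∉ pre := fun h => hx (List.mem_cons_of_mem a h)
    rw [List.cons_append, PySem.List.remove?_cons_of_ne _ ha, ih hx']
    simp

-- invariant of A's first loop: state = pre ++ rest, pre all-operator; the bare requirements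
-- still to process are exactly the bare elements of rest, and the loop yields the stable
-- partition (operator part in order, then the translated bare part in order)
lemma phase1 (n : Nat) : ∀ (rest pre : List String),
    (rest.filter (fun s => !pvHasOp s)).length = n →
    (∀ s ∈ pre, pvHasOp s = true) →
    (rest.filter (fun s => !pvHasOp s)).foldl
      (fun cur req => ((PySem.List.remove? cur req).getD cur) ++ [pvTransA req]) (pre ++ rest)
      = pre ++ rest.filter pvHasOp ++ (rest.filter (fun s => !pvHasOp s)).map pvTransA := by
  induction n with
  | zero =>
    intro rest pre h _
    have hf : rest.filter (fun s => !pvHasOp s) = [] := List.length_eq_zero_iff.mp h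
    have hr : rest.filter pvHasOp = rest := by
      rw [List.filter_eq_self]
      intro a ha
      by_contra hc
      have : a ∈ rest.filter (fun s => !pvHasOp s) :=
        List.mem_filter.mpr ⟨ha, by simp [Bool.eq_false_iff.mpr hc]⟩
      simp [hf] at this
    rw [hf, hr]; simp
  | succ m ihm =>
    intro rest
    induction rest with
    | nil => intro pre h _; simp at h
    | cons x rest2 ihr =>
      intro pre h hpre
      by_cases hx : pvHasOp x = true
      · have hfx : (x :: rest2).filter (fun s => !pvHasOp s)
            = rest2.filter (fun s => !pvHasOp s) := by simp [hx]
        rw [hfx] at h ⊢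
        rw [List.filter_cons_of_pos (by simp [hx]), List.append_cons pre x rest2]
        have := ihr (pre ++ [x]) h (by
          intro s hs
          rcases List.mem_append.mp hs with h1 | h2
          · exact hpre s h1
          · simp at h2; subst h2; exact hx)
        rw [this]; simp
      · have hx' : pvHasOp x = false := Bool.eq_false_iff.mpr hx
        have hfx : (x :: rest2).filter (fun s => !pvHasOp s)
            = x :: rest2.filter (fun s => !pvHasOp s) := by simp [hx']
        have hxpre : x ∉ pre := fun hmem => by simp [hpre x hmem] at hx'
        set tx := pvTransA x with htx
        have htxop : pvHasOp tx = true := by rw [htx, trans_eq]; exact hasOp_transB x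
        have hft : (rest2 ++ [tx]).filter (fun s => !pvHasOp s)
            = rest2.filter (fun s => !pvHasOp s) := by simp [List.filter_append, htxop]
        rw [hfx, List.foldl_cons, remove_append pre rest2 x hxpre]
        have step : (some (pre ++ rest2)).getD (pre ++ x :: rest2) ++ [tx]
            = pre ++ (rest2 ++ [tx]) := by simp
        rw [step]
        have hlen : ((rest2 ++ [tx]).filter (fun s => !pvHasOp s)).length = m := by
          rw [hft]
          have := h; rw [hfx] at this; simpa using this
        have := ihm (rest2 ++ [tx]) pre hlen hpre
        rw [hft] at this
        rw [this]
        rw [List.filter_append, List.filter_cons_of_pos (by simp [htxop]),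
          List.filter_cons_of_neg (by simp [hx'])]
        simp [htx]

-- "<=" in s implies "<" in s, so A's two-operator test is B's single test
lemma less_pred (s : String) :
    ((["<", "<="] : List String).any (fun op => PySem.Str.isIn op s)) = PySem.Str.isIn "<" s := by
  simp only [List.any_cons, List.any_nil, Bool.or_false]
  cases h : PySem.Str.isIn "<" s
  · cases h2 : PySem.Str.isIn "<=" s
    · simp
    · exfalso
      rw [PySem.Str.isIn_iff_infix] at h2
      have h3 : ("<".toList) <:+: s.toList := List.IsInfix.trans ⟨[], ['='], rfl⟩ h2
      rw [← PySem.Str.isIn_iff_infix, h] at h3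
      exact Bool.false_ne_true h3
  · simp

-- B's single pass is the pair of stable filters
lemma ktlem : ∀ (l : List String) (k t : List String),
    l.foldl (fun (p : List String × List String) s =>
      if pvHasOp s then (p.1 ++ [s], p.2) else (p.1, p.2 ++ [pvTransB s])) (k, t)
    = (k ++ l.filter pvHasOp, t ++ (l.filter (fun s => !pvHasOp s)).map pvTransB) := by
  intro l
  induction l with
  | nil => intro k t; simp
  | cons x l ih =>
    intro k t
    cases hx : pvHasOp x
    · simp [hx, ih]
    · simp [hx, ih]

-- ===== VERDICT (by name: the statement is the Claim_ definition above) =====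
theorem translate_installed_requirements_spec : Claim_equal_translate_installed_requirements := by
  intro installed _ _
  unfold Spec_translate_installed_requirements
  have h1 := phase1 (installed.filter (fun s => !pvHasOp s)).length installed [] rfl (by simp)
  rw [List.nil_append] at h1
  unfold translate_installed_requirements translate_installed_requirements_alt
  dsimp only
  rw [h1, PySem.List.foldl_append_singleton_eq_map, ktlem]
  simp only [List.nil_append, List.filter_congr (fun x _ => less_pred x),
    List.map_congr_left (fun x _ => trans_eq x)]
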